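-- pv_equiv track=rewrite | github.com/JKitok/advent-of-code | y24/d5/main.py | part2
-- ===== SOURCE A (Python) =====
-- import math
-- from functools import cmp_to_key
--
-- def part2(rules, update_list):
--     sum_ = 0
--     for numbers in update_list:
--         if not check_ok(rules, numbers):
--             numbers = sorted(
--                 numbers,
--                 key=cmp_to_key(
--                     lambda v1, v2: -1 if check_order_correct(rules, v1, v2) else 1
--                 ),
--             )
--             idx = math.floor(len(numbers) / 2)
--             sum_ += numbers[idx]
--     return sum_
--
-- def check_ok(rules, numbers):
--     for i, n in enumerate(numbers[:-1]):
--         for after in numbers[i + 1 :]: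
--             if not check_order_correct(rules, n, after):
--                 return False
--     return True
--
-- def check_order_correct(rules, n1, n2):
--     one_before_two = n2 in rules[n1]
--     two_before_one = n1 in rules[n2]
--     return one_before_two and not two_before_one
-- ===== SOURCE B (Python) =====
-- def part2(rules, update_list):
--     total = 0
--     for numbers in update_list:
--         L = len(numbers)
--         if all(_before(rules, numbers[i], numbers[j])
--                for i in range(L) for j in range(i + 1, L)):
--             continue
--         target = L - 1 - L // 2
--         for n in numbers:
--             if sum(1 for m in numbers if m != n and _before(rules, n, m)) == target:
--                 total += n
--                 break
--     return total
--
-- def _before(rules, n1, n2):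
--     return n2 in rules[n1] and n1 not in rules[n2]
-- ===== Notes on version B (the rewrite author's own statement) =====
-- stated objective: alternative
-- what changed: B drops the comparator sort entirely: for each out-of-order update it finds the median directly as the unique element whose strict must-precede count over the update equals len-1-len//2 (a counting pass over pairs instead of cmp_to_key sorting plus indexing).
-- outside the precondition, e.g. on part2({0: [], 1: [], 2: [2, 1]}, [[2, 1, 0], [1, 0, 2]]): A returns 1, B returns 4; on part2({0: [1], 1: [0, 2], 2: [2, 1, 0]}, [[2, 2, 2, 2]]): A returns 2, B returns 0
import Mathlib
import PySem

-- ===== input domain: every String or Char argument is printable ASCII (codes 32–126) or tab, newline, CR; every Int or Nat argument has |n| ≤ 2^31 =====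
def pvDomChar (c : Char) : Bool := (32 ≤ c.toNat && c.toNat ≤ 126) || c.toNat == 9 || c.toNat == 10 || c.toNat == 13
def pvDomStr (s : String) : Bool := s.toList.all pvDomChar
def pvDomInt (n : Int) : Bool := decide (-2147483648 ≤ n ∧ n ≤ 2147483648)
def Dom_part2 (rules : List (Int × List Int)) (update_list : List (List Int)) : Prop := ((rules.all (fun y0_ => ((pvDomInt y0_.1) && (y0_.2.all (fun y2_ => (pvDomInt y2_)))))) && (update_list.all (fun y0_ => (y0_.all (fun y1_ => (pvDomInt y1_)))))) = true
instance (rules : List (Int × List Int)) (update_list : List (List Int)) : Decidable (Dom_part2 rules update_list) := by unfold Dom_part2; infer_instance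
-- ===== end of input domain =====

-- B replaces the comparator sort + median index by a direct counting pass (same asymptotic cost;
-- objective: alternative). Equivalence is claimed on Pre_part2 (see its comment).

-- ===== PORT A =====
-- check_order_correct: rules[n1]/rules[n2] would raise KeyError for a missing key; Pre_part2
-- guarantees every looked-up key is present, so the getD default is never taken on admitted inputs.
def checkOrderCorrect (rules : List (Int × List Int)) (n1 n2 : Int) : Bool :=
  let one_before_two := (PySem.Dict.getD ⟨rules⟩ n1 []).contains n2
  let two_before_one := (PySem.Dict.getD ⟨rules⟩ n2 []).contains n1
  one_before_two && !two_before_one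

-- check_ok: the early 'return False' is the List.all short-circuit
def checkOk (rules : List (Int × List Int)) (numbers : List Int) : Bool :=
  (PySem.List.enumerate (PySem.List.slice numbers none (some (-1)))).all
    (fun p => (PySem.List.slice numbers (some (p.1 + 1)) none).all
      (fun after => checkOrderCorrect rules p.2 after))

-- sorted(numbers, key=cmp_to_key(cmp)) where cmp returns -1 iff check_order_correct: ported as a
-- comparator insertion sort; exact on Pre_part2, where the comparator is a strict total order on the
-- update's (distinct) elements, so every comparison sort — CPython's included — returns the unique
-- comparator-increasing arrangement.
def cmpInsert (rules : List (Int × List Int)) (x : Int) : List Int → List Int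
  | [] => [x]
  | y :: ys => if checkOrderCorrect rules x y then x :: y :: ys else y :: cmpInsert rules x ys

def part2 (rules : List (Int × List Int)) (update_list : List (List Int)) : Int :=
  update_list.foldl (fun sum_ numbers =>
    if !(checkOk rules numbers) then
      let ns := numbers.foldl (fun acc x => cmpInsert rules x acc) []
      let idx : Nat := ns.length / 2
      sum_ + PySem.List.pyGetD ns (idx : Int) 0
    else sum_) 0

-- ===== PORT B =====
def beforeB (rules : List (Int × List Int)) (n1 n2 : Int) : Bool :=
  (PySem.Dict.getD ⟨rules⟩ n1 []).contains n2 && !((PySem.Dict.getD ⟨rules⟩ n2 []).contains n1)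

def part2_alt (rules : List (Int × List Int)) (update_list : List (List Int)) : Int :=
  update_list.foldl (fun total numbers =>
    let L := numbers.length
    if (PySem.List.pyRange 0 (L : Int) 1).all (fun i =>
         (PySem.List.pyRange (i + 1) (L : Int) 1).all (fun j =>
           beforeB rules (PySem.List.pyGetD numbers i 0) (PySem.List.pyGetD numbers j 0))) then
      total
    else
      let target : Int := (L : Int) - 1 - (↑(L / 2) : Int)
      match numbers.find? (fun n =>
          ((numbers.countP (fun m => m != n && beforeB rules n m) : Int) == target)) with
      | some n => total + n
      | none => total) 0

-- ===== PRECONDITION & SPEC =====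
-- the strict 'must precede' relation of the rules (used only by Pre_part2)
def pvCC (rules : List (Int × List Int)) (a b : Int) : Bool :=
  (PySem.Dict.getD ⟨rules⟩ a []).contains b && !((PySem.Dict.getD ⟨rules⟩ b []).contains a)

-- Pre_part2 excludes inputs where some update of length ≥ 2 has duplicate elements, an element
-- that is no key of rules (A may raise KeyError), or a pair unrelated / non-transitively related
-- under the rules: there the comparator passed to sorted() is inconsistent and A's median is an
-- artefact of timsort's comparison sequence, which no re-implementation should be specified to
-- reproduce.  (The key-Nodup conjunct excludes no Python input: an association list with a
-- duplicate key denotes no Python dict.)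
def Pre_part2 (rules : List (Int × List Int)) (update_list : List (List Int)) : Prop :=
  (rules.map Prod.fst).Nodup ∧
  ∀ numbers ∈ update_list, 2 ≤ numbers.length →
    numbers.Nodup ∧
    (∀ n ∈ numbers, (PySem.Dict.get? (⟨rules⟩ : PySem.Dict Int (List Int)) n).isSome) ∧
    (∀ a ∈ numbers, ∀ b ∈ numbers, a ≠ b → pvCC rules a b = true ∨ pvCC rules b a = true) ∧
    (∀ a ∈ numbers, ∀ b ∈ numbers, ∀ c ∈ numbers,
      pvCC rules a b = true → pvCC rules b c = true → pvCC rules a c = true)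

instance (rules : List (Int × List Int)) (update_list : List (List Int)) : Decidable (Pre_part2 rules update_list) := by unfold Pre_part2; infer_instance

def pvWitness_part2 : (List (Int × List Int)) × List (List Int) :=
  ([(1, [2, 3]), (2, [3]), (3, [])], [[3, 2, 1], [1, 2, 3]])

def Spec_part2 (rules : List (Int × List Int)) (update_list : List (List Int)) (out : Int) : Prop := out = part2_alt rules update_list
instance (rules : List (Int × List Int)) (update_list : List (List Int)) (out : Int) : Decidable (Spec_part2 rules update_list out) := by unfold Spec_part2; infer_instance

-- ===== CLAIM (what is proved, stated in full; the proofs are below) =====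
def Claim_equal_part2 : Prop := ∀ (rules : List (Int × List Int)) (update_list : List (List Int)), Dom_part2 rules update_list → Pre_part2 rules update_list → Spec_part2 rules update_list (part2 rules update_list)

-- ===== LEMMAS AND PROOFS =====

theorem ccA_eq (rules : List (Int × List Int)) (a b : Int) :
    checkOrderCorrect rules a b = pvCC rules a b := rfl

theorem checkOk_iff (rules : List (Int × List Int)) (numbers : List Int) :
    checkOk rules numbers = true ↔ numbers.Pairwise (fun a b => pvCC rules a b = true) := by
  unfold checkOk
  rw [PySem.List.slice_to_neg_one]
  simp only [List.all_eq_true, PySem.List.mem_enumerate_iff]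
  rw [List.pairwise_iff_getElem]
  constructor
  · rintro h i j hi hj hij
    have hi' : i < numbers.dropLast.length := by
      simp [List.length_dropLast]; omega
    have := h (⟨(0 : Int) + i, numbers.dropLast[i]⟩) ⟨i, hi', rfl⟩
    have hs : PySem.List.slice numbers (some (((0:Int) + i) + 1)) none = numbers.drop (i+1) := by
      rw [show ((0:Int) + i) + 1 = ((i+1 : Nat) : Int) by push_cast; ring]
      rw [PySem.List.slice_from_natCast]
    rw [hs] at this
    have hmem : numbers[j] ∈ numbers.drop (i+1) := by
      rw [List.mem_iff_getElem]
      exact ⟨j - (i+1), by simp [List.length_drop]; omega, by rw [List.getElem_drop]; congr 1; omega⟩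
    have := this _ hmem
    rw [checkOrderCorrect] at this
    have hdl : numbers.dropLast[i] = numbers[i] := List.getElem_dropLast ..
    rw [hdl] at this
    exact this
  · rintro h p ⟨k, hk, rfl⟩ z hz
    have hs : PySem.List.slice numbers (some (((0:Int) + k) + 1)) none = numbers.drop (k+1) := by
      rw [show ((0:Int) + k) + 1 = ((k+1 : Nat) : Int) by push_cast; ring]
      rw [PySem.List.slice_from_natCast]
    rw [hs] at hz
    rw [List.mem_iff_getElem] at hz
    obtain ⟨m, hm, rfl⟩ := hz
    rw [List.getElem_drop]
    have hdl : numbers.dropLast[k] = numbers[k]'(by simp [List.length_dropLast] at hk; omega) := List.getElem_dropLast ..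
    rw [checkOrderCorrect]
    simp only [hdl]
    have hm' : k + 1 + m < numbers.length := by simp [List.length_drop] at hm; omega
    exact h k (k+1+m) _ hm' (by omega)

theorem altCheck_iff (rules : List (Int × List Int)) (numbers : List Int) :
    ((PySem.List.pyRange 0 (numbers.length : Int) 1).all (fun i =>
      (PySem.List.pyRange (i + 1) (numbers.length : Int) 1).all (fun j =>
        beforeB rules (PySem.List.pyGetD numbers i 0) (PySem.List.pyGetD numbers j 0))) = true)
    ↔ numbers.Pairwise (fun a b => pvCC rules a b = true) := by
  simp only [List.all_eq_true, PySem.List.mem_pyRange_one]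
  rw [List.pairwise_iff_getElem]
  constructor
  · rintro h i j hi hj hij
    have := h (i : Int) ⟨by positivity, by exact_mod_cast hi⟩ (j : Int) ⟨by exact_mod_cast hij, by exact_mod_cast hj⟩
    rw [PySem.List.pyGetD_eq_getElem _ _ (by omega) (by exact_mod_cast hi),
         PySem.List.pyGetD_eq_getElem _ _ (by omega) (by exact_mod_cast hj)] at this
    simpa [beforeB, pvCC] using this
  · rintro h i ⟨hi0, hiL⟩ j ⟨hij, hjL⟩
    have hj0 : (0:Int) ≤ j := by omega
    rw [PySem.List.pyGetD_eq_getElem _ _ hi0 hiL, PySem.List.pyGetD_eq_getElem _ _ hj0 hjL, beforeB]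
    exact h i.toNat j.toNat (by omega) (by omega) (by omega)

theorem cmpInsert_perm (rules : List (Int × List Int)) (x : Int) (acc : List Int) :
    (cmpInsert rules x acc).Perm (x :: acc) := by
  induction acc with
  | nil => simp [cmpInsert]
  | cons y ys ih =>
    rw [cmpInsert]
    split
    · exact List.Perm.refl _
    · exact (ih.cons y).trans (List.Perm.swap x y ys)

theorem mem_cmpInsert {rules : List (Int × List Int)} {x z : Int} {acc : List Int} :
    z ∈ cmpInsert rules x acc ↔ z = x ∨ z ∈ acc := by
  rw [(cmpInsert_perm rules x acc).mem_iff]; simp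

theorem pairwise_cmpInsert (rules : List (Int × List Int)) (S : List Int)
    (htot : ∀ a ∈ S, ∀ b ∈ S, a ≠ b → pvCC rules a b = true ∨ pvCC rules b a = true)
    (htrans : ∀ a ∈ S, ∀ b ∈ S, ∀ c ∈ S,
      pvCC rules a b = true → pvCC rules b c = true → pvCC rules a c = true)
    (x : Int) (hx : x ∈ S) :
    ∀ (acc : List Int), (∀ y ∈ acc, y ∈ S) → x ∉ acc →
      acc.Pairwise (fun a b => pvCC rules a b = true) →
      (cmpInsert rules x acc).Pairwise (fun a b => pvCC rules a b = true) := by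
  intro acc
  induction acc with
  | nil => intro _ _ _; simp [cmpInsert]
  | cons y ys ih =>
    intro hsub hxn hp
    rw [cmpInsert]
    rw [List.pairwise_cons] at hp
    split
    · rename_i hxy
      rw [ccA_eq] at hxy
      refine List.pairwise_cons.mpr ⟨?_, List.pairwise_cons.mpr hp⟩
      intro z hz
      rw [List.mem_cons] at hz
      rcases hz with rfl | hz
      · exact hxy
      · exact htrans x hx y (hsub y (by simp)) z (hsub z (by simp [List.mem_cons.mpr (Or.inr hz)]))
          hxy (hp.1 z hz)
    · rename_i hxy
      rw [ccA_eq] at hxy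
      have hyx : pvCC rules y x = true := by
        rcases htot x hx y (hsub y (by simp)) (by intro h; exact hxn (by simp [h])) with h | h
        · exact absurd h (by simp [hxy])
        · exact h
      refine List.pairwise_cons.mpr ⟨?_, ?_⟩
      · intro z hz
        rcases mem_cmpInsert.mp hz with rfl | hz
        · exact hyx
        · exact hp.1 z hz
      · exact ih (fun a ha => hsub a (by simp [ha])) (fun h => hxn (by simp [h])) hp.2

theorem foldl_cmpInsert_inv (rules : List (Int × List Int)) (S : List Int)
    (htot : ∀ a ∈ S, ∀ b ∈ S, a ≠ b → pvCC rules a b = true ∨ pvCC rules b a = true)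
    (htrans : ∀ a ∈ S, ∀ b ∈ S, ∀ c ∈ S,
      pvCC rules a b = true → pvCC rules b c = true → pvCC rules a c = true) :
    ∀ (todo acc : List Int), (∀ y ∈ todo, y ∈ S) → (∀ y ∈ acc, y ∈ S) →
      (acc ++ todo).Nodup → acc.Pairwise (fun a b => pvCC rules a b = true) →
      (todo.foldl (fun a x => cmpInsert rules x a) acc).Perm (acc ++ todo) ∧
      (todo.foldl (fun a x => cmpInsert rules x a) acc).Pairwise (fun a b => pvCC rules a b = true) := by
  intro todo
  induction todo with
  | nil => intro acc _ _ _ hp; simpa using hp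
  | cons x todo ih =>
    intro acc htodoS haccS hnd hp
    simp only [List.foldl_cons]
    have hxS : x ∈ S := htodoS x (by simp)
    have hxacc : x ∉ acc := by
      have := (List.nodup_append.mp hnd).2.2
      intro hmem
      exact this x hmem x (by simp) rfl
    have hperm1 : (cmpInsert rules x acc).Perm (x :: acc) := cmpInsert_perm rules x acc
    have hp1 : (cmpInsert rules x acc).Pairwise (fun a b => pvCC rules a b = true) :=
      pairwise_cmpInsert rules S htot htrans x hxS acc haccS hxacc hp
    have hnd1 : (cmpInsert rules x acc ++ todo).Nodup := by
      have hperm2 : (cmpInsert rules x acc ++ todo).Perm ((x :: acc) ++ todo) :=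
        hperm1.append_right todo
      refine hperm2.nodup_iff.mpr ?_
      have : ((x :: acc) ++ todo).Perm (acc ++ x :: todo) := by
        simpa using (List.perm_middle (a := x) (l₁ := acc) (l₂ := todo)).symm
      exact this.nodup_iff.mpr hnd
    have hsub1 : ∀ y ∈ cmpInsert rules x acc, y ∈ S := by
      intro y hy
      rcases mem_cmpInsert.mp hy with rfl | hy
      · exact hxS
      · exact haccS y hy
    obtain ⟨hperm', hp'⟩ := ih (cmpInsert rules x acc) (fun y hy => htodoS y (by simp [hy])) hsub1 hnd1 hp1
    refine ⟨hperm'.trans ?_, hp'⟩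
    have h1 : (cmpInsert rules x acc ++ todo).Perm (x :: (acc ++ todo)) := by
      simpa using hperm1.append_right todo
    exact h1.trans List.perm_middle.symm

theorem pvCC_asymm (rules : List (Int × List Int)) {a b : Int} (h : pvCC rules a b = true) :
    pvCC rules b a = false := by
  simp only [pvCC, Bool.and_eq_true] at h
  simp only [pvCC, h.1, Bool.not_true, Bool.and_false]

theorem countP_sorted (rules : List (Int × List Int)) :
    ∀ (l : List Int), l.Pairwise (fun a b => pvCC rules a b = true) → l.Nodup →
    ∀ i (hi : i < l.length),
      l.countP (fun m => (m != l[i]) && pvCC rules l[i] m) = l.length - 1 - i := by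
  intro l
  induction l with
  | nil => intro _ _ i hi; simp at hi
  | cons x xs ih =>
    intro hp hnd i hi
    rw [List.pairwise_cons] at hp
    rw [List.nodup_cons] at hnd
    match i with
    | 0 =>
      simp only [List.getElem_cons_zero, List.countP_cons]
      have hx : ((x != x) && pvCC rules x x) = false := by simp
      rw [hx]
      have : xs.countP (fun m => (m != x) && pvCC rules x m) = xs.length := by
        rw [List.countP_eq_length]
        intro m hm
        have h1 : m ≠ x := fun h => hnd.1 (h ▸ hm)
        simp [h1, hp.1 m hm]
      simp [this]
    | i + 1 =>
      have hi' : i < xs.length := by simpa using hi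
      simp only [List.getElem_cons_succ, List.countP_cons]
      have hn : xs[i] ∈ xs := List.getElem_mem _
      have hx : ((x != xs[i]) && pvCC rules (xs[i]) x) = false := by
        have := pvCC_asymm rules (hp.1 _ hn)
        simp [this]
      rw [hx]
      have hIH := ih hp.2 hnd.2 i hi'
      simp only [List.length_cons, Bool.false_eq_true, if_false, add_zero]
      rw [hIH]
      omega

theorem find?_unique {p : Int → Bool} {a : Int} :
    ∀ {xs : List Int}, a ∈ xs → (∀ x ∈ xs, (p x = true ↔ x = a)) → xs.find? p = some a := by
  intro xs
  induction xs with
  | nil => intro h; simp at h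
  | cons x xs ih =>
    intro hmem hiff
    rw [List.find?_cons]
    by_cases hpx : p x = true
    · have hxa : x = a := (hiff x (by simp)).mp hpx
      subst hxa
      simp [hpx]
    · have hxa : x ≠ a := fun h => hpx ((hiff x (by simp)).mpr h)
      have : a ∈ xs := by rcases List.mem_cons.mp hmem with h | h; exact absurd h.symm hxa; exact h
      simp only [Bool.not_eq_true] at hpx
      simp [hpx]
      exact ih this (fun y hy => hiff y (by simp [hy]))

theorem pairwise_of_len_le_one {R : Int → Int → Prop} {l : List Int} (h : l.length ≤ 1) :
    l.Pairwise R := by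
  match l, h with
  | [], _ => exact List.Pairwise.nil
  | [a], _ => simp

theorem step_eq (rules : List (Int × List Int)) (numbers : List Int) (s : Int)
    (hnd : 2 ≤ numbers.length → numbers.Nodup)
    (htot : 2 ≤ numbers.length → ∀ a ∈ numbers, ∀ b ∈ numbers, a ≠ b →
      pvCC rules a b = true ∨ pvCC rules b a = true)
    (htrans : 2 ≤ numbers.length → ∀ a ∈ numbers, ∀ b ∈ numbers, ∀ c ∈ numbers,
      pvCC rules a b = true → pvCC rules b c = true → pvCC rules a c = true) :
    (if !(checkOk rules numbers) then
      s + PySem.List.pyGetD (numbers.foldl (fun acc x => cmpInsert rules x acc) [])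
        (Nat.cast ((numbers.foldl (fun acc x => cmpInsert rules x acc) []).length / 2) : Int) 0
     else s)
    =
    (if (PySem.List.pyRange 0 (numbers.length : Int) 1).all (fun i =>
         (PySem.List.pyRange (i + 1) (numbers.length : Int) 1).all (fun j =>
           beforeB rules (PySem.List.pyGetD numbers i 0) (PySem.List.pyGetD numbers j 0))) then
      s
     else
      match numbers.find? (fun n =>
          ((numbers.countP (fun m => m != n && beforeB rules n m) : Int) ==
            ((numbers.length : Int) - 1 - (↑(numbers.length / 2) : Int)))) with
      | some n => s + n
      | none => s) := by
  by_cases hP : numbers.Pairwise (fun a b => pvCC rules a b = true)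
  · rw [if_pos ((altCheck_iff rules numbers).mpr hP)]
    rw [(checkOk_iff rules numbers).mpr hP]
    simp
  · have hok : checkOk rules numbers = false :=
      Bool.eq_false_iff.mpr (fun h => hP ((checkOk_iff rules numbers).mp h))
    rw [if_neg (fun h => hP ((altCheck_iff rules numbers).mp h))]
    rw [hok]
    simp only [Bool.not_false, if_pos]
    have hL2 : 2 ≤ numbers.length := by
      by_contra h
      exact hP (pairwise_of_len_le_one (by omega))
    have hnd' := hnd hL2
    obtain ⟨hperm, hpair⟩ := foldl_cmpInsert_inv rules numbers (htot hL2) (htrans hL2)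
      numbers [] (fun y hy => hy) (fun y hy => by simp at hy) (by simpa using hnd') List.Pairwise.nil
    set l := numbers.foldl (fun acc x => cmpInsert rules x acc) [] with hl
    rw [List.nil_append] at hperm
    have hlen : l.length = numbers.length := hperm.length_eq
    have hlnd : l.Nodup := hperm.nodup_iff.mpr hnd'
    have hk : numbers.length / 2 < numbers.length := by omega
    have hkl : l.length / 2 < l.length := by omega
    -- A's median value
    have hA : PySem.List.pyGetD l (Nat.cast (l.length / 2) : Int) 0 = l[l.length / 2] := by
      rw [PySem.List.pyGetD_eq_getElem _ _ (by positivity) (by exact_mod_cast hkl)]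
      congr 1
    -- B's find? returns the same element
    have hfind : numbers.find? (fun n =>
          ((numbers.countP (fun m => m != n && beforeB rules n m) : Int) ==
            ((numbers.length : Int) - 1 - (↑(numbers.length / 2) : Int)))) = some (l[l.length / 2]) := by
      apply find?_unique
      · exact hperm.mem_iff.mp (List.getElem_mem _)
      · intro n hn
        have hnl : n ∈ l := hperm.mem_iff.mpr hn
        obtain ⟨i, hi, rfl⟩ := List.mem_iff_getElem.mp hnl
        have hcnt : numbers.countP (fun m => m != l[i] && beforeB rules (l[i]) m) =
            l.length - 1 - i := by
          rw [← hperm.countP_eq]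
          exact countP_sorted rules l hpair hlnd i hi
        rw [hcnt]
        rw [beq_iff_eq]
        constructor
        · intro hEq
          have : i = l.length / 2 := by
            have h1 : ((l.length - 1 - i : Nat) : Int) =
                (numbers.length : Int) - 1 - ((numbers.length / 2 : Nat) : Int) := hEq
            rw [← hlen] at h1
            omega
          exact (List.Nodup.getElem_inj_iff hlnd).mpr this ▸ rfl
        · intro hEq
          have : i = l.length / 2 := (List.Nodup.getElem_inj_iff hlnd).mp hEq
          subst this
          rw [← hlen]
          push_cast
          omega
    rw [hfind, hA]

theorem foldl_step_eq (rules : List (Int × List Int)) :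
    ∀ (ul : List (List Int)) (s : Int), Pre_part2 rules ul →
    ul.foldl (fun sum_ numbers =>
      if !(checkOk rules numbers) then
        let ns := numbers.foldl (fun acc x => cmpInsert rules x acc) []
        let idx : Nat := ns.length / 2
        sum_ + PySem.List.pyGetD ns (idx : Int) 0
      else sum_) s
    =
    ul.foldl (fun total numbers =>
      let L := numbers.length
      if (PySem.List.pyRange 0 (L : Int) 1).all (fun i =>
           (PySem.List.pyRange (i + 1) (L : Int) 1).all (fun j =>
             beforeB rules (PySem.List.pyGetD numbers i 0) (PySem.List.pyGetD numbers j 0))) then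
        total
      else
        let target : Int := (L : Int) - 1 - (↑(L / 2) : Int)
        match numbers.find? (fun n =>
            ((numbers.countP (fun m => m != n && beforeB rules n m) : Int) == target)) with
        | some n => total + n
        | none => total) s := by
  intro ul
  induction ul with
  | nil => intro s _; rfl
  | cons numbers ul ih =>
    intro s hpre
    rw [List.foldl_cons, List.foldl_cons]
    have hc := hpre.2 numbers (by simp)
    have hstep : (if !(checkOk rules numbers) then
          let ns := numbers.foldl (fun acc x => cmpInsert rules x acc) []
          let idx : Nat := ns.length / 2
          s + PySem.List.pyGetD ns (idx : Int) 0
        else s)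
      = (let L := numbers.length
        if (PySem.List.pyRange 0 (L : Int) 1).all (fun i =>
             (PySem.List.pyRange (i + 1) (L : Int) 1).all (fun j =>
               beforeB rules (PySem.List.pyGetD numbers i 0) (PySem.List.pyGetD numbers j 0))) then
          s
        else
          let target : Int := (L : Int) - 1 - (↑(L / 2) : Int)
          match numbers.find? (fun n =>
              ((numbers.countP (fun m => m != n && beforeB rules n m) : Int) == target)) with
          | some n => s + n
          | none => s) := by
      exact step_eq rules numbers s (fun h => (hc h).1) (fun h => (hc h).2.2.1)
        (fun h => (hc h).2.2.2)
    rw [hstep]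
    exact ih _ ⟨hpre.1, fun ns hns => hpre.2 ns (by simp [hns])⟩

-- ===== VERDICT (by name: the statement is the Claim_ definition above) =====
theorem part2_spec : Claim_equal_part2 := by
  intro rules update_list _ hpre
  exact foldl_step_eq rules update_list 0 hpre
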